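-- pv_equiv track=rewrite | github.com/wool0826/aim-to-faang | Hyunsookim92/828 Count Unique Characters of All Substrings of a Given String.py | uniqueLetterString
-- ===== SOURCE A (Python) =====
-- def uniqueLetterString(s: str) -> int:
--     result = 0  # 결과
--     arr1 = []   # 부분 문자열을 담아두는 임시 배열
--
--     length = len(s)
--
--     # 부분 문자열 생성
--     for i in range(length):
--         for j in range(i,length):
--             arr1.append(s[i:j+1])
--
--     for i in range(len(arr1)):
--         x = arr1[i]     # 부분 문자열 x
--         arr2 = []       # 부분 문자열의 요소로 이루어진 배열
--
--         for i in range(len(x)):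
--             arr2.append(x[i])
--
--         count={}    # 부분 문자열의 요소 개수를 세는 배열
--
--         for i in arr2:
--             try: count[i] += 1
--             except: count[i] = 1
--
--         for key in count:
--             if count[key] == 1:
--                 result += 1
--
--     return result
-- ===== SOURCE B (Python) =====
-- def uniqueLetterString(s: str) -> int:
--     # One pass per start index: extend the substring one char at a time, maintaining
--     # a character counter and the running number of unique characters incrementally.
--     n = len(s)
--     total = 0
--     for i in range(n):
--         cnt = {}
--         uniq = 0
--         for c in s[i:]:
--             k = cnt.get(c, 0)
--             cnt[c] = k + 1
--             if k == 0:
--                 uniq += 1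
--             elif k == 1:
--                 uniq -= 1
--             total += uniq
--     return total
-- ===== Notes on version B (the rewrite author's own statement) =====
-- stated objective: faster
-- what changed: Instead of materializing every substring and recounting its characters from scratch, B makes one pass per start index, extending the substring one character at a time while maintaining a character counter and the running number of unique characters incrementally.
import Mathlib
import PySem

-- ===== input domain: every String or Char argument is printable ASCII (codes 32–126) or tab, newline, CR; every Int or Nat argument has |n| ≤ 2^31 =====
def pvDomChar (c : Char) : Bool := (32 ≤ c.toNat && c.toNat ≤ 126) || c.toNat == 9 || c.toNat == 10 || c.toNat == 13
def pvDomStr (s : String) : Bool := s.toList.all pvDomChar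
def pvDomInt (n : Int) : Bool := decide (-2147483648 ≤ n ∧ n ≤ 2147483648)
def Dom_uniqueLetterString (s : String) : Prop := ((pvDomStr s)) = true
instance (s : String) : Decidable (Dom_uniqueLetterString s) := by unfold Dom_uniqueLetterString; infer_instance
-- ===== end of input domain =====

-- B replaces A's "enumerate all substrings, recount each from scratch" (O(n^3) substrings work)
-- by one pass per start index that maintains the counter and the unique count incrementally.

-- ===== PORT A =====
-- A's counting loop: for i in arr2: try: count[i] += 1 except: count[i] = 1
def pvA_counts (arr2 : List Char) : PySem.Dict Char Int :=
  arr2.foldl (fun count i =>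
    match count.get? i with
    | some v => count.insert i (v + 1)
    | none   => count.insert i 1) PySem.Dict.empty

-- A's per-substring body: build arr2 from x by index, count, add the keys with count 1
-- (x[i] with i from range(len(x)) is always in range, so pyGetD's default is never read)
def pvA_body (result : Int) (x : List Char) : Int :=
  let arr2 : List Char :=
    (PySem.List.pyRange 0 (PySem.List.len x)).foldl
      (fun acc i => acc ++ [PySem.List.pyGetD x i ' ']) []
  let count := pvA_counts arr2
  count.keys.foldl
    (fun result key =>
      match count.get? key with
      | some v => if v == 1 then result + 1 else result
      | none => result) result

def uniqueLetterString (s : String) : Int :=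
  let cs := s.toList
  let length := PySem.List.len cs
  let arr1 : List (List Char) :=
    (PySem.List.pyRange 0 length).foldl
      (fun arr1 i =>
        (PySem.List.pyRange i length).foldl
          (fun arr1 j => arr1 ++ [PySem.List.slice cs (some i) (some (j + 1))]) arr1)
      []
  (PySem.List.pyRange 0 (PySem.List.len arr1)).foldl
    (fun result i => pvA_body result (PySem.List.pyGetD arr1 i [])) 0

-- ===== PORT B =====
-- one step of B's inner loop: state = (cnt, uniq, total)
def pvB_step (st : PySem.Dict Char Int × Int × Int) (c : Char) : PySem.Dict Char Int × Int × Int :=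
  let k := st.1.getD c 0
  let cnt := st.1.insert c (k + 1)
  let uniq := if k == 0 then st.2.1 + 1 else if k == 1 then st.2.1 - 1 else st.2.1
  (cnt, uniq, st.2.2 + uniq)

def uniqueLetterString_alt (s : String) : Int :=
  let cs := s.toList
  let n := PySem.List.len cs
  (PySem.List.pyRange 0 n).foldl
    (fun total i =>
      ((PySem.List.slice cs (some i) none).foldl pvB_step (PySem.Dict.empty, 0, total)).2.2)
    0

-- ===== PRECONDITION & SPEC =====
def Spec_uniqueLetterString (s : String) (out : Int) : Prop := out = uniqueLetterString_alt s
instance (s : String) (out : Int) : Decidable (Spec_uniqueLetterString s out) := by unfold Spec_uniqueLetterString; infer_instance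

-- ===== CLAIM (what is proved, stated in full; the proofs are below) =====
def Claim_equal_uniqueLetterString : Prop := ∀ (s : String), Dom_uniqueLetterString s → Spec_uniqueLetterString s (uniqueLetterString s)

-- ===== LEMMAS AND PROOFS =====

-- number of characters occurring exactly once in l
def pvU (l : List Char) : Int :=
  ((PySem.Set.ofList l).countP (fun c => ((l.count c : Int) == 1)) : Int)

-- sum of pvU over the extensions of p by one more nonempty prefix of l
def pvPrefSum (p l : List Char) : Int :=
  match l with
  | [] => 0
  | c :: t => pvU (p ++ [c]) + pvPrefSum (p ++ [c]) t

lemma pv_countP_update (m : List Char) (hm : m.Nodup) (c : Char) (hc : c ∈ m)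
    (f g : Char → Bool) (h : ∀ d ∈ m, d ≠ c → f d = g d) :
    (m.countP f : Int) = (m.countP g : Int)
      + (if f c then 1 else 0) - (if g c then 1 else 0) := by
  induction m with
  | nil => cases hc
  | cons a t ih =>
    rcases List.nodup_cons.mp hm with ⟨ha, ht⟩
    by_cases hac : a = c
    · subst hac
      have hfg : t.countP f = t.countP g :=
        List.countP_congr (fun d hd => by
          rw [h d (List.mem_cons_of_mem _ hd) (fun e => ha (e ▸ hd))])
      simp only [List.countP_cons, hfg]
      push_cast
      split_ifs <;> omega
    · have hc' : c ∈ t := by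
        rcases List.mem_cons.mp hc with h1 | h1
        · exact absurd h1.symm hac
        · exact h1
      have hfa : f a = g a := h a List.mem_cons_self hac
      have hih := ih ht hc' (fun d hd hdc => h d (List.mem_cons_of_mem _ hd) hdc)
      simp only [List.countP_cons, hfa]
      push_cast
      push_cast at hih
      split_ifs at hih ⊢ <;> omega

lemma pvU_append (l : List Char) (c : Char) :
    pvU (l ++ [c]) =
      if l.count c = 0 then pvU l + 1
      else if l.count c = 1 then pvU l - 1
      else pvU l := by
  have hofl : PySem.Set.ofList (l ++ [c]) = PySem.Set.add (PySem.Set.ofList l) c := by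
    rw [PySem.Set.ofList_eq_foldl, PySem.Set.ofList_eq_foldl, List.foldl_append]
    rfl
  have hcnt : ∀ d : Char, (l ++ [c]).count d = l.count d + (if d = c then 1 else 0) := by
    intro d
    rw [List.count_append]
    by_cases hdc : d = c
    · simp [hdc]
    · simp [hdc, Ne.symm hdc]
  have hc2 : (((l ++ [c]).count c : Nat) : Int) = ((l.count c : Nat) : Int) + 1 := by
    rw [hcnt c]
    push_cast
    simp
  by_cases hmem : c ∈ l
  · have hadd : PySem.Set.add (PySem.Set.ofList l) c = PySem.Set.ofList l := by
      simp [PySem.Set.add, PySem.Set.contains, hmem]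
    have hcm : c ∈ PySem.Set.ofList l := (PySem.Set.mem_ofList l c).mpr hmem
    have key := pv_countP_update (PySem.Set.ofList l) (PySem.Set.nodup_ofList l) c hcm
      (fun d => (((l ++ [c]).count d : Int) == 1))
      (fun d => ((l.count d : Int) == 1))
      (fun d _ hdc => by simp [hcnt d, hdc])
    have hge : 1 ≤ l.count c := List.one_le_count_iff.mpr hmem
    unfold pvU
    rw [hofl, hadd, key]
    beta_reduce
    simp only [beq_iff_eq]
    split_ifs <;> omega
  · have hcz : l.count c = 0 := List.count_eq_zero_of_not_mem hmem
    have hadd : PySem.Set.add (PySem.Set.ofList l) c = PySem.Set.ofList l ++ [c] := by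
      simp [PySem.Set.add, PySem.Set.contains, hmem]
    have hcong : (PySem.Set.ofList l).countP (fun d => (((l ++ [c]).count d : Int) == 1))
        = (PySem.Set.ofList l).countP (fun d => ((l.count d : Int) == 1)) :=
      List.countP_congr (fun d hd => by
        have hdc : d ≠ c := fun e => hmem (e ▸ (PySem.Set.mem_ofList l d).mp hd)
        simp [hcnt d, hdc])
    unfold pvU
    rw [hofl, hadd, List.countP_append, hcong]
    simp only [List.countP_cons, List.countP_nil, beq_iff_eq]
    push_cast
    split_ifs <;> omega

-- A's counting loop builds Counter(arr2)
lemma pvA_counts_eq (x : List Char) : pvA_counts x = PySem.Dict.counter x := by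
  unfold pvA_counts
  rw [PySem.List.foldl_congr_mem _ _ (fun d c => d.insert c (d.getD c 0 + 1)) _ ?_,
      PySem.Dict.foldl_insert_getD_add_one_eq_counter]
  intro d c _
  cases h : d.get? c with
  | none =>
    show d.insert c 1 = d.insert c (d.getD c 0 + 1)
    rw [PySem.Dict.getD_eq_get?_getD, h]
    rfl
  | some v =>
    show d.insert c (v + 1) = d.insert c (d.getD c 0 + 1)
    rw [PySem.Dict.getD_eq_get?_getD, h]
    rfl

-- A's per-substring body adds exactly pvU x
lemma pvA_body_eq (r : Int) (x : List Char) : pvA_body r x = r + pvU x := by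
  simp only [pvA_body]
  rw [PySem.List.foldl_append_singleton_eq_map (f := fun i => PySem.List.pyGetD x i ' '),
      List.nil_append, PySem.List.map_pyGetD_pyRange_zero, pvA_counts_eq,
      PySem.Dict.keys_counter]
  rw [PySem.List.foldl_congr_mem _ _
        (fun acc key => if ((x.count key : Int) == 1) then acc + 1 else acc) _ ?_,
      PySem.List.foldl_if_add_one]
  · rfl
  · intro acc key hk
    have hmem : key ∈ x := (PySem.Set.mem_ofList x key).mp hk
    have hcont : (PySem.Dict.counter x).contains key = true := by
      rw [PySem.Dict.contains_counter]
      simp [hmem]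
    have hsome : (PySem.Dict.counter x).get? key = some ((x.count key : Int)) := by
      rw [PySem.Dict.contains_eq_isSome_get?] at hcont
      cases h : (PySem.Dict.counter x).get? key with
      | none => rw [h] at hcont; simp at hcont
      | some v =>
        have hgd := PySem.Dict.getD_counter x key
        rw [PySem.Dict.getD_eq_get?_getD, h] at hgd
        simp at hgd
        rw [hgd]
    simp only [hsome]

lemma pvA_eq_sum (arr1 : List (List Char)) :
    (PySem.List.pyRange 0 (PySem.List.len arr1)).foldl
      (fun result i => pvA_body result (PySem.List.pyGetD arr1 i [])) 0
      = (arr1.map pvU).sum := by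
  rw [PySem.List.foldl_congr_mem _ _
        (fun (r : Int) i => r + pvU (PySem.List.pyGetD arr1 i []))
        _ (fun acc i _ => pvA_body_eq _ _),
      PySem.List.foldl_add]
  have hcomp : (fun i => pvU (PySem.List.pyGetD arr1 i []))
      = pvU ∘ (fun i => PySem.List.pyGetD arr1 i []) := rfl
  rw [hcomp, ← List.map_map, PySem.List.map_pyGetD_pyRange_zero]
  simp

lemma pv_sum_map_flatMap {α β : Type} (l : List α) (g : α → List β) (f : β → Int) :
    ((l.flatMap g).map f).sum = (l.map (fun a => ((g a).map f).sum)).sum := by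
  induction l with
  | nil => rfl
  | cons a t ih => simp [List.flatMap_cons, ih]

lemma pv_pyRange_add (a m : Nat) :
    PySem.List.pyRange (a : Int) ((a + m : Nat) : Int)
      = (List.range m).map (fun t => ((a + t : Nat) : Int)) := by
  induction m generalizing a with
  | zero =>
    have h : PySem.List.pyRange (a : Int) ((a + 0 : Nat) : Int) = [] := by
      apply List.eq_nil_iff_forall_not_mem.mpr
      intro i hi
      have := (PySem.List.mem_pyRange_one).mp hi
      omega
    rw [h]
    rfl
  | succ m ih =>
    have hlt : (a : Int) < ((a + (m + 1) : Nat) : Int) := by push_cast; omega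
    rw [PySem.List.pyRange_one_cons hlt]
    have h1 : (a : Int) + 1 = ((a + 1 : Nat) : Int) := by push_cast; ring
    have h2 : ((a + (m + 1) : Nat) : Int) = (((a + 1) + m : Nat) : Int) := by push_cast; ring
    have htail : (List.range m).map (fun t => (((a + 1) + t : Nat) : Int))
        = (List.range m).map ((fun t => ((a + t : Nat) : Int)) ∘ Nat.succ) := by
      apply List.map_congr_left
      intro t ht
      simp only [Function.comp_apply, Nat.succ_eq_add_one]
      push_cast
      ring
    rw [h1, h2, ih (a + 1), List.range_succ_eq_map, List.map_cons, List.map_map, htail]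
    simp

lemma pvPrefSum_eq_sum (q l : List Char) :
    pvPrefSum q l = ((List.range l.length).map (fun t => pvU (q ++ l.take (t + 1)))).sum := by
  induction l generalizing q with
  | nil => rfl
  | cons c t ih =>
    show pvU (q ++ [c]) + pvPrefSum (q ++ [c]) t = _
    rw [ih (q ++ [c]), List.length_cons, List.range_succ_eq_map, List.map_cons, List.map_map]
    simp [List.take_succ_cons, List.append_assoc, Function.comp_def, Nat.succ_eq_add_one]

-- B's inner loop invariant
lemma pv_innerB (l p : List Char) (tot : Int) :
    (l.foldl pvB_step (PySem.Dict.counter p, pvU p, tot)).2.2 = tot + pvPrefSum p l := by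
  induction l generalizing p tot with
  | nil => simp [pvPrefSum]
  | cons c t ih =>
    have hk : (PySem.Dict.counter p).getD c 0 = ((p.count c : Nat) : Int) :=
      PySem.Dict.getD_counter p c
    have hcnt : (PySem.Dict.counter p).insert c ((PySem.Dict.counter p).getD c 0 + 1)
        = PySem.Dict.counter (p ++ [c]) := by
      rw [← PySem.Dict.foldl_insert_getD_add_one_eq_counter,
          ← PySem.Dict.foldl_insert_getD_add_one_eq_counter, List.foldl_append]
      rfl
    have huniq :
        (if (PySem.Dict.counter p).getD c 0 == 0 then pvU p + 1
         else if (PySem.Dict.counter p).getD c 0 == 1 then pvU p - 1 else pvU p)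
        = pvU (p ++ [c]) := by
      rw [hk, pvU_append]
      by_cases h0 : p.count c = 0
      · simp [h0]
      · by_cases h1 : p.count c = 1
        · simp [h1]
        · have e0 : ¬ ((((p.count c : Nat) : Int) == 0) = true) := by simp; omega
          have e1 : ¬ ((((p.count c : Nat) : Int) == 1) = true) := by simp; omega
          simp [h0, h1, e0, e1]
    show (t.foldl pvB_step (pvB_step (PySem.Dict.counter p, pvU p, tot) c)).2.2 = _
    have hstep : pvB_step (PySem.Dict.counter p, pvU p, tot) c
        = (PySem.Dict.counter (p ++ [c]), pvU (p ++ [c]), tot + pvU (p ++ [c])) := by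
      simp only [pvB_step]
      rw [hcnt, huniq]
    rw [hstep, ih (p ++ [c]) (tot + pvU (p ++ [c]))]
    show _ = tot + (pvU (p ++ [c]) + pvPrefSum (p ++ [c]) t)
    ring

lemma pvB_inner (cs : List Char) (i tot : Int) :
    ((PySem.List.slice cs (some i) none).foldl pvB_step (PySem.Dict.empty, 0, tot)).2.2
      = tot + pvPrefSum [] (PySem.List.slice cs (some i) none) :=
  pv_innerB (PySem.List.slice cs (some i) none) [] tot

-- the common value: per start index k, the sum over all end indices
lemma pv_per_start (cs : List Char) (k : Nat) :
    ((PySem.List.pyRange (k : Int) ((cs.length : Nat) : Int)).map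
        (fun j => pvU (PySem.List.slice cs (some (k : Int)) (some (j + 1))))).sum
      = pvPrefSum [] (List.drop k cs) := by
  by_cases hk : k ≤ cs.length
  · have hn : ((cs.length : Nat) : Int) = ((k + (cs.length - k) : Nat) : Int) := by
      push_cast; omega
    rw [hn, pv_pyRange_add, List.map_map, pvPrefSum_eq_sum, List.length_drop]
    apply congrArg
    apply List.map_congr_left
    intro t ht
    have ht' : t < cs.length - k := List.mem_range.mp ht
    show pvU (PySem.List.slice cs (some (k : Int)) (some (((k + t : Nat) : Int) + 1))) = _
    have hj : ((k + t : Nat) : Int) + 1 = (((k + t + 1) : Nat) : Int) := by push_cast; ring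
    rw [hj, PySem.List.slice_natCast cs k (k + t + 1)]
    have hminus : k + t + 1 - k = t + 1 := by omega
    rw [hminus, List.nil_append]
  · have hnil : PySem.List.pyRange (k : Int) ((cs.length : Nat) : Int) = [] := by
      apply List.eq_nil_iff_forall_not_mem.mpr
      intro i hi
      have := (PySem.List.mem_pyRange_one).mp hi
      omega
    rw [hnil, List.drop_eq_nil_of_le (by omega)]
    rfl

-- ===== VERDICT (by name: the statement is the Claim_ definition above) =====
theorem uniqueLetterString_spec : Claim_equal_uniqueLetterString := by
  intro s _
  unfold Spec_uniqueLetterString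
  have hlen : PySem.List.len s.toList = ((s.toList.length : Nat) : Int) := rfl
  have hA : uniqueLetterString s
      = ((PySem.List.pyRange 0 ((s.toList.length : Nat) : Int)).map
          (fun i => ((PySem.List.pyRange i ((s.toList.length : Nat) : Int)).map
            (fun j => pvU (PySem.List.slice s.toList (some i) (some (j + 1))))).sum)).sum := by
    simp only [uniqueLetterString]
    rw [hlen]
    simp only [PySem.List.foldl_append_singleton_eq_map, PySem.List.foldl_append_eq_flatMap,
      List.nil_append]
    rw [pvA_eq_sum, pv_sum_map_flatMap]
    simp [List.map_map, Function.comp_def]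
  have hB : uniqueLetterString_alt s
      = ((PySem.List.pyRange 0 ((s.toList.length : Nat) : Int)).map
          (fun i => pvPrefSum [] (PySem.List.slice s.toList (some i) none))).sum := by
    simp only [uniqueLetterString_alt]
    rw [hlen]
    rw [PySem.List.foldl_congr_mem _ _
          (fun (total : Int) i => total + pvPrefSum [] (PySem.List.slice s.toList (some i) none))
          _ (fun acc i _ => pvB_inner s.toList i acc),
        PySem.List.foldl_add]
    simp
  rw [hA, hB]
  apply congrArg
  apply List.map_congr_left
  intro i hi
  have hmem := (PySem.List.mem_pyRange_one).mp hi
  have h0 : 0 ≤ i := hmem.1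
  have hi' : i = ((i.toNat : Nat) : Int) := (Int.toNat_of_nonneg h0).symm
  rw [hi', PySem.List.slice_from s.toList (by omega)]
  rw [Int.toNat_natCast]
  exact pv_per_start s.toList i.toNat
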